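-- pv_equiv track=rewrite | github.com/capyBearista/codepath | TIP102/3.py | reverse_comments_queue
-- ===== SOURCE A (Python) =====
-- def reverse_comments_queue(comments):
--     stack = []
--     for elem in comments:
--         stack.append(elem)
--
--     reverse_stack = []
--     while stack:
--         reverse_stack.append(stack.pop())
--
--     return reverse_stack
-- ===== SOURCE B (Python) =====
-- def reverse_comments_queue(comments):
--     result = []
--     for i in range(len(comments) - 1, -1, -1):
--         result.append(comments[i])
--     return result
-- ===== Notes on version B (the rewrite author's own statement) =====
-- stated objective: simpler
-- what changed: Replaces the two sequential passes (copy into a stack, then pop everything into a second list) by a single backward index scan that appends comments[i] for i from len-1 down to 0.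
import Mathlib
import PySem

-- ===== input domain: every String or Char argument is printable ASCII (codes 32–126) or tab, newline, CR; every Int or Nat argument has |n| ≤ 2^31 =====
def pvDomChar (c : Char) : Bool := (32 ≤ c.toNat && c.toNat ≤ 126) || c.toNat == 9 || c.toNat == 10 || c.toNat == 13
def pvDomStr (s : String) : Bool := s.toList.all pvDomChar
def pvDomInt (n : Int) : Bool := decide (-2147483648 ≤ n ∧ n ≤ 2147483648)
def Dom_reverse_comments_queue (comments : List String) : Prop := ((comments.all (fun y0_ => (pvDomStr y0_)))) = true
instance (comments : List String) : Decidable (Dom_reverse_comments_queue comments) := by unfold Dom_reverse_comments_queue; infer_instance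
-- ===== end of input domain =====

-- B replaces A's two passes (copy into a stack, then pop into a second list) by one backward index scan: simpler.


-- ===== PORT A =====
-- the 'while stack: reverse_stack.append(stack.pop())' loop, step for step
def pvPopAll (stack : List String) (reverse_stack : List String) : List String :=
  if h : stack = [] then reverse_stack
  else pvPopAll stack.dropLast (reverse_stack ++ [stack.getLast h])
termination_by stack.length
decreasing_by
  simp only [List.length_dropLast]
  have : stack.length ≠ 0 := by simpa using fun hh => h (List.eq_nil_of_length_eq_zero hh)
  omega

def reverse_comments_queue (comments : List String) : List String :=
  let stack := comments.foldl (fun s elem => s ++ [elem]) []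
  pvPopAll stack []

-- ===== PORT B =====
def reverse_comments_queue_alt (comments : List String) : List String :=
  (PySem.List.pyRange ((comments.length : Int) - 1) (-1) (-1)).foldl
    (fun result i => result ++ [PySem.List.pyGetD comments i ""]) []

-- ===== PRECONDITION & SPEC =====
def Spec_reverse_comments_queue (comments : List String) (out : List String) : Prop := out = reverse_comments_queue_alt comments
instance (comments : List String) (out : List String) : Decidable (Spec_reverse_comments_queue comments out) := by unfold Spec_reverse_comments_queue; infer_instance

-- ===== CLAIM (what is proved, stated in full; the proofs are below) =====
def Claim_equal_reverse_comments_queue : Prop := ∀ (comments : List String), Dom_reverse_comments_queue comments → Spec_reverse_comments_queue comments (reverse_comments_queue comments)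

-- ===== LEMMAS AND PROOFS =====

lemma pvPopAll_eq (stack : List String) : ∀ acc, pvPopAll stack acc = acc ++ stack.reverse := by
  induction stack using List.reverseRecOn with
  | nil => intro acc; simp [pvPopAll]
  | append_singleton xs x ih =>
      intro acc
      rw [pvPopAll]
      simp only [List.append_ne_nil_of_right_ne_nil xs (by simp : [x] ≠ ([] : List String)),
        dite_false, List.dropLast_concat, List.getLast_concat, ih]
      simp

lemma foldl_snoc_eq (xs : List String) : ∀ acc, xs.foldl (fun s elem => s ++ [elem]) acc = acc ++ xs := by
  induction xs with
  | nil => simp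
  | cons y ys ih => intro acc; simp [List.foldl_cons, ih]

lemma A_eq_reverse (comments : List String) : reverse_comments_queue comments = comments.reverse := by
  unfold reverse_comments_queue
  rw [foldl_snoc_eq, pvPopAll_eq]
  simp

lemma foldl_getD_range (comments : List String) :
    ∀ (n : Nat) (acc : List String), n ≤ comments.length →
      (PySem.List.pyRange ((n : Int) - 1) (-1) (-1)).foldl
        (fun result i => result ++ [PySem.List.pyGetD comments i ""]) acc
      = acc ++ (comments.take n).reverse := by
  intro n
  induction n with
  | zero => intro acc _; rw [PySem.List.pyRange_neg_one_eq_nil (by omega)]; simp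
  | succ m ih =>
      intro acc hle
      rw [PySem.List.pyRange_neg_one_cons (by omega)]
      simp only [List.foldl_cons]
      rw [show ((Nat.succ m : Int) - 1) = (m : Int) by push_cast; ring] at *
      rw [ih (acc ++ [PySem.List.pyGetD comments ((m : Int)) ""]) (by omega)]
      have hget : PySem.List.pyGetD comments ((m : Int)) "" = comments[m]'(by omega) := by
        rw [PySem.List.pyGetD_eq_getElem (i := (m : Int)) (h0 := by omega) (h1 := by exact_mod_cast hle)]
        simp
      rw [hget]
      have : (comments.take (m + 1)).reverse = comments[m]'(by omega) :: (comments.take m).reverse := by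
        rw [List.take_add_one]
        simp [List.getElem?_eq_getElem (by omega : m < comments.length)]
      rw [this]
      simp

lemma B_eq_reverse (comments : List String) : reverse_comments_queue_alt comments = comments.reverse := by
  unfold reverse_comments_queue_alt
  have := foldl_getD_range comments comments.length [] (le_refl _)
  simpa using this

-- ===== VERDICT (by name: the statement is the Claim_ definition above) =====
theorem reverse_comments_queue_spec : Claim_equal_reverse_comments_queue := by
  intro comments _
  unfold Spec_reverse_comments_queue
  rw [A_eq_reverse, B_eq_reverse]
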